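-- pv_equiv track=rewrite | github.com/rejoice4156/iti0002-2024 | EX/ex07/capitalize_letters.py | capitalize_letters
-- ===== SOURCE A (Python) =====
-- def capitalize_letters(text: str) -> str:
--     """
--     If a letter is present in given string in both lowercase and uppercase, capitalize all occurrences of the letter.
--
--     Examples:
--     capitalize_letters("") -> ""
--     capitalize_letters("abbA") -> "AbbA"
--     capitalize_letters("abBa") -> "aBBa"
--     capitalize_letters("AbBa") -> "ABBA"
--     capitalize_letters("AbbA") -> "AbbA
--     capitalize_letters("abba") -> "abba"
--     capitalize_letters("ABBA") -> "ABBA"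
--
--     :param text: given text
--     :return: capitalized text
--     """
--     # Create a set containing all unique letters from the text.
--     lower_case = set(text.lower())
--     # Create an empty set to store all letters that appear in both lower- and uppercase.
--     both_cases = set()
--     # From the set of unique letters in the text, find which letters appear in both lower- and uppercase.
--     for letter in lower_case:
--         if letter.lower() in text and letter.upper() in text:
--             # Add the lowercase version of the letter to both_cases set.
--             both_cases.add(letter.lower())
--     # Create new empty string named result.
--     result = ""
--     # Go through all letters in the original text string.
--     for letter in text:
--         # Check if any given letter in lowercase form appears in the both_cases set.
--         if letter.lower() in both_cases:
--             # If yes, then add the uppercase version of it to the result.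
--             result += letter.upper()
--         else:
--             # If not, then just add the letter as it was to the result.
--             result += letter
--     return result
-- ===== SOURCE B (Python) =====
-- def capitalize_letters(text: str) -> str:
--     """Capitalize every letter that occurs in both cases, via one membership set and a single join pass."""
--     present = set(text)
--     return ''.join(
--         c.upper() if c.lower() in present and c.upper() in present else c
--         for c in text
--     )
-- ===== Notes on version B (the rewrite author's own statement) =====
-- stated objective: simpler
-- what changed: A first builds a both_cases set by scanning the whole text twice for every distinct lowered letter and then folds over the text testing that set; B builds one membership set of the text's characters and produces the result in a single join pass whose per-character test (c.lower() in present and c.upper() in present) replaces the precomputed both_cases set entirely.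
import Mathlib
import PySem

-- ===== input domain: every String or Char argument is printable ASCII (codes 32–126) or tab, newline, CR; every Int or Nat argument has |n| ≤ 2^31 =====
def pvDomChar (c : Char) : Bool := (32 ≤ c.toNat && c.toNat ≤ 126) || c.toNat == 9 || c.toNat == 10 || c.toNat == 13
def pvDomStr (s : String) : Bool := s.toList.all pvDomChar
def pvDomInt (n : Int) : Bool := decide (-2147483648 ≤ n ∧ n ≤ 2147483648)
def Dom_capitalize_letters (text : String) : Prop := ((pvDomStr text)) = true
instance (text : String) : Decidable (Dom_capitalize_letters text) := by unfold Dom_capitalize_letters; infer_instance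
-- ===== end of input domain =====

-- B replaces A's two-phase set-of-both-case-letters construction by one membership set and a single
-- per-character pass (objective: simpler).

-- ===== PORT A =====
-- Python's 1-char 'letter.lower()' / 'letter.upper()' are PySem.Chars.lowerChar/upperChar, and
-- ''x in text'' for a 1-char string x is exactly character membership (List.contains).
def capitalize_letters (text : String) : String :=
  let tl := text.toList
  let lower_case : PySem.Set Char := PySem.Set.ofList (PySem.Chars.lower tl)
  -- iteration over the set lower_case: both_cases is only consumed by membership tests, so order-independent
  let both_cases : PySem.Set Char :=
    lower_case.foldl (fun bc letter =>
      if tl.contains (PySem.Chars.lowerChar letter) && tl.contains (PySem.Chars.upperChar letter)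
      then PySem.Set.add bc (PySem.Chars.lowerChar letter) else bc) PySem.Set.empty
  let result : List Char :=
    tl.foldl (fun res c =>
      if both_cases.contains (PySem.Chars.lowerChar c)
      then res ++ [PySem.Chars.upperChar c] else res ++ [c]) []
  String.mk result

-- ===== PORT B =====
def capitalize_letters_alt (text : String) : String :=
  let tl := text.toList
  let present : PySem.Set Char := PySem.Set.ofList tl
  String.mk (tl.map (fun c =>
    if present.contains (PySem.Chars.lowerChar c) && present.contains (PySem.Chars.upperChar c)
    then PySem.Chars.upperChar c else c))

-- ===== PRECONDITION & SPEC =====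
def Spec_capitalize_letters (text : String) (out : String) : Prop := out = capitalize_letters_alt text
instance (text : String) (out : String) : Decidable (Spec_capitalize_letters text out) := by unfold Spec_capitalize_letters; infer_instance

-- ===== CLAIM (what is proved, stated in full; the proofs are below) =====
def Claim_equal_capitalize_letters : Prop := ∀ (text : String), Dom_capitalize_letters text → Spec_capitalize_letters text (capitalize_letters text)

-- ===== LEMMAS AND PROOFS =====

theorem pv_char_le_iff (a b : Char) : a ≤ b ↔ a.toNat ≤ b.toNat := by
  simp only [Char.le_def, UInt32.le_iff_toNat_le]; rfl

theorem pv_isupper_iff (c : Char) : PySem.Chars.isupper c = true ↔ 65 ≤ c.toNat ∧ c.toNat ≤ 90 := by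
  simp only [PySem.Chars.isupper, Bool.and_eq_true, decide_eq_true_eq, pv_char_le_iff]
  constructor <;> (intro h; exact h)

theorem pv_islower_iff (c : Char) : PySem.Chars.islower c = true ↔ 97 ≤ c.toNat ∧ c.toNat ≤ 122 := by
  simp only [PySem.Chars.islower, Bool.and_eq_true, decide_eq_true_eq, pv_char_le_iff]
  constructor <;> (intro h; exact h)

theorem pv_toNat_ofNat_small (n : Nat) (h : n < 55296) : (Char.ofNat n).toNat = n := by
  rw [Char.toNat_ofNat, if_pos]; unfold Nat.isValidChar; omega

theorem pv_lowerChar_idem (c : Char) :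
    PySem.Chars.lowerChar (PySem.Chars.lowerChar c) = PySem.Chars.lowerChar c := by
  simp only [PySem.Chars.lowerChar]
  split_ifs with h1 h2 <;> try rfl
  exfalso
  rw [pv_isupper_iff] at h1 h2
  rw [pv_toNat_ofNat_small (c.toNat + 32) (by omega)] at h2
  omega

theorem pv_upperChar_lowerChar (c : Char) :
    PySem.Chars.upperChar (PySem.Chars.lowerChar c) = PySem.Chars.upperChar c := by
  by_cases h : PySem.Chars.isupper c = true
  · have hb := (pv_isupper_iff c).mp h
    have hlc : PySem.Chars.lowerChar c = Char.ofNat (c.toNat + 32) := by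
      simp [PySem.Chars.lowerChar, h]
    have htn : (Char.ofNat (c.toNat + 32)).toNat = c.toNat + 32 :=
      pv_toNat_ofNat_small _ (by omega)
    have hlow : PySem.Chars.islower (Char.ofNat (c.toNat + 32)) = true := by
      rw [pv_islower_iff, htn]; omega
    have hnotlow : PySem.Chars.islower c = true → False := by
      intro hl; rw [pv_islower_iff] at hl; omega
    rw [hlc]
    simp only [PySem.Chars.upperChar, hlow, if_true, htn]
    rw [if_neg hnotlow]
    have : c.toNat + 32 - 32 = c.toNat := by omega
    rw [this, Char.ofNat_toNat]
  · have hlc : PySem.Chars.lowerChar c = c := by simp [PySem.Chars.lowerChar, h]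
    rw [hlc]

-- membership in A's both_cases fold
theorem pv_mem_foldl_add (L : List Char) (p : Char → Bool) (f : Char → Char)
    (init : PySem.Set Char) (x : Char) :
    x ∈ L.foldl (fun bc a => if p a then PySem.Set.add bc (f a) else bc) init ↔
      x ∈ init ∨ ∃ a ∈ L, p a = true ∧ x = f a := by
  induction L generalizing init with
  | nil => simp
  | cons h t ih =>
    simp only [List.foldl_cons]
    by_cases hp : p h = true
    · rw [if_pos hp, ih, PySem.Set.mem_add]
      constructor
      · rintro (⟨hx | hx⟩ | ⟨a, ha, hpa, hxa⟩)
        · exact Or.inl hx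
        · exact Or.inr ⟨h, List.mem_cons_self, hp, hx⟩
        · exact Or.inr ⟨a, List.mem_cons_of_mem _ ha, hpa, hxa⟩
      · rintro (hx | ⟨a, ha, hpa, hxa⟩)
        · exact Or.inl (Or.inl hx)
        · rcases List.mem_cons.mp ha with rfl | ha
          · exact Or.inl (Or.inr hxa)
          · exact Or.inr ⟨a, ha, hpa, hxa⟩
    · rw [if_neg hp, ih]
      constructor
      · rintro (hx | ⟨a, ha, hpa, hxa⟩)
        · exact Or.inl hx
        · exact Or.inr ⟨a, List.mem_cons_of_mem _ ha, hpa, hxa⟩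
      · rintro (hx | ⟨a, ha, hpa, hxa⟩)
        · exact Or.inl hx
        · rcases List.mem_cons.mp ha with rfl | ha
          · exact absurd hpa hp
          · exact Or.inr ⟨a, ha, hpa, hxa⟩

-- the two per-character conditions agree for every character of the text
theorem pv_cond_eq (tl : List Char) (c : Char) (hc : c ∈ tl) :
    ((PySem.Set.ofList (PySem.Chars.lower tl)).foldl (fun bc letter =>
        if tl.contains (PySem.Chars.lowerChar letter) && tl.contains (PySem.Chars.upperChar letter)
        then PySem.Set.add bc (PySem.Chars.lowerChar letter) else bc)
      PySem.Set.empty).contains (PySem.Chars.lowerChar c) =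
    ((PySem.Set.ofList tl).contains (PySem.Chars.lowerChar c) &&
      (PySem.Set.ofList tl).contains (PySem.Chars.upperChar c)) := by
  rw [Bool.eq_iff_iff]
  simp only [PySem.Set.contains]
  rw [List.contains_iff_mem]
  rw [pv_mem_foldl_add]
  simp only [Bool.and_eq_true, List.contains_iff_mem, PySem.Set.mem_ofList]
  constructor
  · rintro (hx | ⟨a, ha, ⟨hal, hau⟩, hxa⟩)
    · exact absurd hx (by simp [PySem.Set.empty])
    · have ha' : ∃ d, d ∈ tl ∧ PySem.Chars.lowerChar d = a := by
        simpa [PySem.Chars.lower] using ha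
      obtain ⟨d, _, rfl⟩ := ha'
      rw [pv_lowerChar_idem] at hal hxa
      rw [pv_upperChar_lowerChar] at hau
      rw [hxa]
      refine ⟨hal, ?_⟩
      rw [← pv_upperChar_lowerChar c, hxa, pv_upperChar_lowerChar d]
      exact hau
  · rintro ⟨hl, hu⟩
    refine Or.inr ⟨PySem.Chars.lowerChar c, ?_, ⟨?_, ?_⟩, (pv_lowerChar_idem c).symm⟩
    · simp only [PySem.Chars.lower, List.mem_map]
      exact ⟨c, hc, rfl⟩
    · rw [pv_lowerChar_idem]; exact hl
    · rw [pv_upperChar_lowerChar]; exact hu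

-- ===== VERDICT (by name: the statement is the Claim_ definition above) =====
theorem capitalize_letters_spec : Claim_equal_capitalize_letters := by
  intro text _
  unfold Spec_capitalize_letters capitalize_letters capitalize_letters_alt
  simp only []
  congr 1
  have hcongr :
      text.toList.foldl (fun res c =>
        if ((PySem.Set.ofList (PySem.Chars.lower text.toList)).foldl (fun bc letter =>
              if text.toList.contains (PySem.Chars.lowerChar letter) &&
                 text.toList.contains (PySem.Chars.upperChar letter)
              then PySem.Set.add bc (PySem.Chars.lowerChar letter) else bc)
            PySem.Set.empty).contains (PySem.Chars.lowerChar c)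
        then res ++ [PySem.Chars.upperChar c] else res ++ [c]) [] =
      text.toList.foldl (fun res c =>
        res ++ [if (PySem.Set.ofList text.toList).contains (PySem.Chars.lowerChar c) &&
                   (PySem.Set.ofList text.toList).contains (PySem.Chars.upperChar c)
                then PySem.Chars.upperChar c else c]) [] := by
    apply PySem.List.foldl_congr_mem
    intro acc c hc
    rw [pv_cond_eq text.toList c hc]
    split_ifs <;> rfl
  rw [hcongr, PySem.List.foldl_append_singleton_eq_map]
  simp
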